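-- pv_equiv track=rewrite | github.com/lucianoscarpaci/Technical-Interview-Prep | Unit11/PartB/p1.py | nearest_zombie
-- ===== SOURCE A (Python) =====
-- from collections import deque
--
-- def next_moves(position, grid, visited):
--     row, col = position
--     rows, cols = len(grid), len(grid[0])
--
--     directions = [(-1, 0), (1, 0), (0, -1), (0, 1)]  # Up, Down, Left, Right
--     valid_moves = []
--
--     for d_row, d_col in directions:
--         new_row, new_col = row + d_row, col + d_col
--         if (
--             0 <= new_row < rows
--             and 0 <= new_col < cols
--             and not visited[new_row][new_col]
--         ):
--             valid_moves.append((new_row, new_col))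
--
--     return valid_moves
--
-- def nearest_zombie(grid):
--     m, n = len(grid), len(grid[0])
--
--     distances = [[-1 for _ in range(n)] for _ in range(m)]
--
--     queue = deque()
--     visited = [[False for _ in range(n)] for _ in range(m)]
--     # Start BFS from all zombies
--     for row in range(m):
--         for col in range(n):
--             if grid[row][col] == 0:
--                 queue.append((row, col))
--                 visited[row][col] = True
--                 distances[row][col] = 0
--
--     while queue:
--         current = queue.popleft()
--         for move in next_moves(current, grid, visited):
--             visited[move[0]][move[1]] = True
--             distances[move[0]][move[1]] = distances[current[0]][current[1]] + 1
--             queue.append(move)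
--     return distances
-- ===== SOURCE B (Python) =====
-- def nearest_zombie(grid):
--     m, n = len(grid), len(grid[0])
--     zeros = [(r, c) for r in range(m) for c in range(n) if grid[r][c] == 0]
--     return [[min((abs(i - r) + abs(j - c) for r, c in zeros), default=-1)
--              for j in range(n)]
--             for i in range(m)]
-- ===== Notes on version B (the rewrite author's own statement) =====
-- stated objective: alternative
-- what changed: Replaces the multi-source BFS (deque + visited + distance mutation) by a per-cell closed form: since the grid has no obstacles, the BFS distance to the nearest 0 is exactly the minimum Manhattan distance over all 0-cells, computed directly (-1 when there is no 0).
import Mathlib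
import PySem

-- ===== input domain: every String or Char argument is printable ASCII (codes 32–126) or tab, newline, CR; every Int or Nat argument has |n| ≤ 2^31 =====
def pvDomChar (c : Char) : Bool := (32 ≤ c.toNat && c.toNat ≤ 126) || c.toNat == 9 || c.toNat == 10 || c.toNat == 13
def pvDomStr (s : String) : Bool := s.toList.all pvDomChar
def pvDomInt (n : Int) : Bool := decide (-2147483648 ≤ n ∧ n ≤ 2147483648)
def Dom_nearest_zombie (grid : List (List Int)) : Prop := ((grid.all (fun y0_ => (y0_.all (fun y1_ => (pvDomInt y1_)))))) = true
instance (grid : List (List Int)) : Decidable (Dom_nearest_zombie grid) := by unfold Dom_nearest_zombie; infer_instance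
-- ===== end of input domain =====

-- B replaces A's multi-source BFS (queue + visited + distance mutation) by a per-cell closed form:
-- with no obstacles the BFS distance to the nearest 0 is exactly the minimum Manhattan distance to a 0
-- (objective: alternative/simpler; not faster). Equality is about return values; neither mutates its argument.

-- ===== PORT A =====
-- 2D read/write helpers shared by both ports (Python's g[i][j] and g[i][j] = x on in-range indices)
def pvGet2I (g : List (List Int)) (i j : Nat) : Int := (g.getD i []).getD j 0
def pvGet2B (v : List (List Bool)) (i j : Nat) : Bool := (v.getD i []).getD j false
def pvSet2I (g : List (List Int)) (i j : Nat) (x : Int) : List (List Int) :=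
  g.set i ((g.getD i []).set j x)
def pvSet2B (v : List (List Bool)) (i j : Nat) (x : Bool) : List (List Bool) :=
  v.set i ((v.getD i []).set j x)

-- Python's next_moves: scan the four directions, keep in-range unvisited neighbours
def next_moves (position : Nat × Nat) (grid : List (List Int))
    (visited : List (List Bool)) : List (Nat × Nat) :=
  let rows : Nat := grid.length
  let cols : Nat := (grid.headD []).length
  let dirs : List (Int × Int) := [(-1, 0), (1, 0), (0, -1), (0, 1)]
  dirs.foldl (fun acc d =>
    let nr : Int := (position.1 : Int) + d.1
    let nc : Int := (position.2 : Int) + d.2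
    if 0 ≤ nr ∧ nr < (rows : Int) ∧ 0 ≤ nc ∧ nc < (cols : Int) ∧
        pvGet2B visited nr.toNat nc.toNat = false
    then acc ++ [(nr.toNat, nc.toNat)] else acc) []

-- the two seeding double loops (queue, visited, distances evolve together)
def pvSeed (grid : List (List Int)) (m n : Nat) :
    List (Nat × Nat) × List (List Bool) × List (List Int) :=
  (List.range m).foldl (fun st row =>
    (List.range n).foldl (fun st col =>
      if pvGet2I grid row col = 0 then
        (st.1 ++ [(row, col)], pvSet2B st.2.1 row col true, pvSet2I st.2.2 row col 0)
      else st) st)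
    ([], (List.range m).map (fun _ => (List.range n).map (fun _ => false)),
         (List.range m).map (fun _ => (List.range n).map (fun _ => (-1 : Int))))

-- the while-queue loop; fuel only makes the recursion structural, the proofs show it never runs out
def pvBfs (grid : List (List Int)) :
    Nat → List (Nat × Nat) → List (List Bool) → List (List Int) → List (List Int)
  | 0, _, _, d => d
  | _ + 1, [], _, d => d
  | fuel + 1, cur :: rest, v, d =>
    let st := (next_moves cur grid v).foldl
      (fun (st : List (List Bool) × List (List Int) × List (Nat × Nat)) mv =>
        (pvSet2B st.1 mv.1 mv.2 true,
         pvSet2I st.2.1 mv.1 mv.2 (pvGet2I st.2.1 cur.1 cur.2 + 1),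
         st.2.2 ++ [mv])) (v, d, rest)
    pvBfs grid fuel st.2.2 st.1 st.2.1

def nearest_zombie (grid : List (List Int)) : List (List Int) :=
  let m := grid.length
  let n := (grid.headD []).length
  let s := pvSeed grid m n
  pvBfs grid (s.1.length + m * n + 1) s.1 s.2.1 s.2.2

-- ===== PORT B =====
-- Source B: zeros = [(r,c) for r in range(m) for c in range(n) if grid[r][c]==0]
def pvZeros (grid : List (List Int)) : List (Nat × Nat) :=
  (List.range grid.length).flatMap (fun r =>
    (((List.range (grid.headD []).length).filter (fun c => pvGet2I grid r c = 0)).map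
      (fun c => (r, c))))

-- abs(i - r) + abs(j - c)
def pvManh (i j : Nat) (z : Nat × Nat) : Int :=
  |(i : Int) - (z.1 : Int)| + |(j : Int) - (z.2 : Int)|

-- min(gen, default=-1)
def pvNearest (grid : List (List Int)) (i j : Nat) : Int :=
  PySem.List.minD ((pvZeros grid).map (pvManh i j)) (fun x => x) (-1)

def nearest_zombie_alt (grid : List (List Int)) : List (List Int) :=
  (List.range grid.length).map (fun i =>
    (List.range (grid.headD []).length).map (fun j => pvNearest grid i j))

-- ===== PRECONDITION & SPEC =====
-- Pre_ excludes exactly the inputs on which Python A raises IndexError: the empty grid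
-- (len(grid[0])) and ragged grids with a row shorter than the first row (grid[row][col]).
def Pre_nearest_zombie (grid : List (List Int)) : Prop :=
  grid ≠ [] ∧ ∀ row ∈ grid, (grid.headD []).length ≤ row.length
instance (grid : List (List Int)) : Decidable (Pre_nearest_zombie grid) := by
  unfold Pre_nearest_zombie; infer_instance

def pvWitness_nearest_zombie : List (List Int) := [[0, 1], [1, 1]]

def Spec_nearest_zombie (grid : List (List Int)) (out : List (List Int)) : Prop :=
  out = nearest_zombie_alt grid
instance (grid : List (List Int)) (out : List (List Int)) :
    Decidable (Spec_nearest_zombie grid out) := by unfold Spec_nearest_zombie; infer_instance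

-- ===== CLAIM (what is proved, stated in full; the proofs are below) =====
def Claim_equal_nearest_zombie : Prop :=
  ∀ (grid : List (List Int)), Dom_nearest_zombie grid → Pre_nearest_zombie grid →
    Spec_nearest_zombie grid (nearest_zombie grid)

-- ===== LEMMAS AND PROOFS =====

-- abbreviations used only by the proofs
def pvM (grid : List (List Int)) : Nat := grid.length
def pvN (grid : List (List Int)) : Nat := (grid.headD []).length
-- 4-neighbourhood
def pvNbr (p q : Nat × Nat) : Prop :=
  ((p.1 : Int) - (q.1 : Int)).natAbs + ((p.2 : Int) - (q.2 : Int)).natAbs = 1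
-- Manhattan distance as a Nat
def pvNatManh (i j : Nat) (z : Nat × Nat) : Nat :=
  ((i : Int) - (z.1 : Int)).natAbs + ((j : Int) - (z.2 : Int)).natAbs
-- minimum Manhattan distance to a zero cell (none iff there is no zero cell)
def pvDN (grid : List (List Int)) (i j : Nat) : Option Nat :=
  ((pvZeros grid).map (pvNatManh i j)).min?
def pvDNv (grid : List (List Int)) (p : Nat × Nat) : Nat := (pvDN grid p.1 p.2).getD 0
def pvVis (v : List (List Bool)) (i j : Nat) : Prop := pvGet2B v i j = true
def pvShapeB (grid : List (List Int)) (v : List (List Bool)) : Prop :=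
  v.length = pvM grid ∧ ∀ r ∈ v, r.length = pvN grid
def pvShapeI (grid : List (List Int)) (d : List (List Int)) : Prop :=
  d.length = pvM grid ∧ ∀ r ∈ d, r.length = pvN grid
def pvFalseCount (v : List (List Bool)) : Nat := (v.map (fun r => r.count false)).sum

-- the BFS loop invariant
def pvInv (grid : List (List Int)) (q : List (Nat × Nat)) (v : List (List Bool))
    (d : List (List Int)) : Prop :=
  pvShapeB grid v ∧ pvShapeI grid d ∧
  (∀ i j, i < pvM grid → j < pvN grid → pvVis v i j →
    ∃ k, pvDN grid i j = some k ∧ pvGet2I d i j = (k : Int)) ∧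
  (∀ i j, i < pvM grid → j < pvN grid → ¬ pvVis v i j → pvGet2I d i j = -1) ∧
  (∀ p ∈ q, p.1 < pvM grid ∧ p.2 < pvN grid ∧ pvVis v p.1 p.2) ∧
  q.Pairwise (fun a b => pvDNv grid a ≤ pvDNv grid b) ∧
  (∀ a ∈ q, ∀ b ∈ q, pvDNv grid b ≤ pvDNv grid a + 1) ∧
  (∀ i j, i < pvM grid → j < pvN grid → pvVis v i j → (i, j) ∉ q →
    ∀ i' j', i' < pvM grid → j' < pvN grid → pvNbr (i, j) (i', j') → pvVis v i' j') ∧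
  (∀ p ∈ pvZeros grid, pvVis v p.1 p.2)

-- ---- generic getD/set facts ----
lemma pv_getD_set_self {α : Type} (l : List α) (i : Nat) (x dflt : α) (h : i < l.length) :
    (l.set i x).getD i dflt = x := by
  simp [List.getD_eq_getElem?_getD, h]

lemma pv_getD_set_ne {α : Type} (l : List α) (i k : Nat) (x dflt : α) (h : i ≠ k) :
    (l.set i x).getD k dflt = l.getD k dflt := by
  simp [List.getD_eq_getElem?_getD, List.getElem?_set_ne h]

lemma pv_get2B_set2B_self (v : List (List Bool)) (i j : Nat) (x : Bool)
    (hi : i < v.length) (hj : j < (v.getD i []).length) :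
    pvGet2B (pvSet2B v i j x) i j = x := by
  unfold pvGet2B pvSet2B
  rw [pv_getD_set_self _ _ _ _ hi, pv_getD_set_self _ _ _ _ hj]

lemma pv_get2B_set2B_ne (v : List (List Bool)) (i j i' j' : Nat) (x : Bool)
    (h : (i, j) ≠ (i', j')) : pvGet2B (pvSet2B v i j x) i' j' = pvGet2B v i' j' := by
  unfold pvGet2B pvSet2B
  by_cases hii : i = i'
  · subst hii
    have hjj : j ≠ j' := by simpa using h
    by_cases hlt : i < v.length
    · rw [pv_getD_set_self _ _ _ _ hlt, pv_getD_set_ne _ _ _ _ _ hjj]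
    · rw [List.set_eq_of_length_le (by omega)]
  · rw [pv_getD_set_ne _ _ _ _ _ hii]

lemma pv_get2I_set2I_self (d : List (List Int)) (i j : Nat) (x : Int)
    (hi : i < d.length) (hj : j < (d.getD i []).length) :
    pvGet2I (pvSet2I d i j x) i j = x := by
  unfold pvGet2I pvSet2I
  rw [pv_getD_set_self _ _ _ _ hi, pv_getD_set_self _ _ _ _ hj]

lemma pv_get2I_set2I_ne (d : List (List Int)) (i j i' j' : Nat) (x : Int)
    (h : (i, j) ≠ (i', j')) : pvGet2I (pvSet2I d i j x) i' j' = pvGet2I d i' j' := by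
  unfold pvGet2I pvSet2I
  by_cases hii : i = i'
  · subst hii
    have hjj : j ≠ j' := by simpa using h
    by_cases hlt : i < d.length
    · rw [pv_getD_set_self _ _ _ _ hlt, pv_getD_set_ne _ _ _ _ _ hjj]
    · rw [List.set_eq_of_length_le (by omega)]
  · rw [pv_getD_set_ne _ _ _ _ _ hii]

lemma pv_getD_mem {α : Type} (l : List α) (i : Nat) (dflt : α) (h : i < l.length) :
    l.getD i dflt ∈ l := by
  rw [List.getD_eq_getElem?_getD, List.getElem?_eq_getElem h]
  exact List.getElem_mem h

lemma pv_shapeB_set (grid : List (List Int)) (v : List (List Bool)) (i j : Nat) (x : Bool)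
    (h : pvShapeB grid v) : pvShapeB grid (pvSet2B v i j x) := by
  obtain ⟨h1, h2⟩ := h
  by_cases hlt : i < v.length
  · refine ⟨by simpa [pvSet2B] using h1, fun r hr => ?_⟩
    rcases List.mem_or_eq_of_mem_set hr with hmem | heq
    · exact h2 r hmem
    · subst heq
      rw [List.length_set]
      exact h2 _ (pv_getD_mem _ _ _ hlt)
  · unfold pvSet2B
    rw [List.set_eq_of_length_le (by omega)]
    exact ⟨h1, h2⟩

lemma pv_shapeI_set (grid : List (List Int)) (d : List (List Int)) (i j : Nat) (x : Int)
    (h : pvShapeI grid d) : pvShapeI grid (pvSet2I d i j x) := by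
  obtain ⟨h1, h2⟩ := h
  by_cases hlt : i < d.length
  · refine ⟨by simpa [pvSet2I] using h1, fun r hr => ?_⟩
    rcases List.mem_or_eq_of_mem_set hr with hmem | heq
    · exact h2 r hmem
    · subst heq
      rw [List.length_set]
      exact h2 _ (pv_getD_mem _ _ _ hlt)
  · unfold pvSet2I
    rw [List.set_eq_of_length_le (by omega)]
    exact ⟨h1, h2⟩

lemma pv_count_set_false (l : List Bool) (j : Nat) (hj : j < l.length)
    (hf : l[j] = false) : (l.set j true).count false + 1 = l.count false := by
  induction l generalizing j with
  | nil => simp at hj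
  | cons a t ih =>
    cases j with
    | zero => simp_all [List.count_cons]
    | succ j =>
      have h2 := ih j (by simpa using hj) (by simpa using hf)
      simp only [List.set_cons_succ, List.count_cons]
      omega

lemma pv_falseCount_set (v : List (List Bool)) (i j : Nat)
    (hi : i < v.length) (hj : j < (v.getD i []).length)
    (hf : pvGet2B v i j = false) :
    pvFalseCount (pvSet2B v i j true) + 1 = pvFalseCount v := by
  induction v generalizing i with
  | nil => simp at hi
  | cons r t ih =>
    cases i with
    | zero =>
      have hjr : j < r.length := by simpa using hj
      have hrf : r[j] = false := by
        unfold pvGet2B at hf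
        simpa [List.getD_eq_getElem?_getD, List.getElem?_eq_getElem hjr] using hf
      have hc := pv_count_set_false r j hjr hrf
      unfold pvFalseCount pvSet2B
      simp only [List.getD_cons_zero, List.set_cons_zero, List.map_cons, List.sum_cons]
      omega
    | succ i =>
      have h2 := ih i (by simpa using hi) (by simpa using hj)
        (by unfold pvGet2B at hf ⊢; simpa using hf)
      unfold pvFalseCount pvSet2B at h2 ⊢
      simp only [List.getD_cons_succ, List.set_cons_succ, List.map_cons, List.sum_cons] at h2 ⊢
      omega

lemma pv_falseCount_le (grid : List (List Int)) (v : List (List Bool))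
    (h : pvShapeB grid v) : pvFalseCount v ≤ pvM grid * pvN grid := by
  obtain ⟨h1, h2⟩ := h
  unfold pvFalseCount
  have hle : (v.map (fun r => r.count false)).sum ≤ (v.map (fun _ => pvN grid)).sum := by
    apply List.sum_le_sum
    intro x hx
    have h3 : x.count false ≤ x.length := List.count_le_length
    rw [h2 x hx] at h3
    exact h3
  refine le_trans hle ?_
  rw [List.map_const', List.sum_replicate, smul_eq_mul, h1, Nat.mul_comm]

-- ---- zeros and the distance function ----
lemma pv_mem_zeros (grid : List (List Int)) (p : Nat × Nat) :
    p ∈ pvZeros grid ↔ p.1 < pvM grid ∧ p.2 < pvN grid ∧ pvGet2I grid p.1 p.2 = 0 := by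
  obtain ⟨a, b⟩ := p
  simp only [pvZeros, pvM, pvN, List.mem_flatMap, List.mem_map, List.mem_filter,
    List.mem_range, Prod.mk.injEq, decide_eq_true_eq]
  constructor
  · rintro ⟨r, hr, c, ⟨hc, hz⟩, rfl, rfl⟩
    exact ⟨hr, hc, hz⟩
  · rintro ⟨ha, hb, hz⟩
    exact ⟨a, ha, b, ⟨hb, hz⟩, rfl, rfl⟩

lemma pv_dn_le (grid : List (List Int)) (i j : Nat) (z : Nat × Nat) (hz : z ∈ pvZeros grid) :
    ∃ k, pvDN grid i j = some k ∧ k ≤ pvNatManh i j z := by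
  unfold pvDN
  cases hm : ((pvZeros grid).map (pvNatManh i j)).min? with
  | none =>
    rw [List.min?_eq_none_iff, List.map_eq_nil_iff] at hm
    rw [hm] at hz
    simp at hz
  | some k =>
    rw [List.min?_eq_some_iff] at hm
    exact ⟨k, rfl, hm.2 _ (List.mem_map.mpr ⟨z, hz, rfl⟩)⟩

lemma pv_dn_attained (grid : List (List Int)) (i j : Nat) (k : Nat)
    (h : pvDN grid i j = some k) : ∃ z ∈ pvZeros grid, pvNatManh i j z = k := by
  unfold pvDN at h
  rw [List.min?_eq_some_iff] at h
  obtain ⟨hm, -⟩ := h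
  simpa using (List.mem_map.mp hm)

lemma pv_dn_zero (grid : List (List Int)) (i j : Nat) :
    pvDN grid i j = some 0 ↔ (i, j) ∈ pvZeros grid := by
  constructor
  · intro h
    obtain ⟨z, hz, hmanh⟩ := pv_dn_attained grid i j 0 h
    have : z = (i, j) := by
      obtain ⟨a, b⟩ := z
      unfold pvNatManh at hmanh
      simp only [Prod.mk.injEq]
      omega
    rwa [this] at hz
  · intro h
    unfold pvDN
    rw [List.min?_eq_some_iff]
    refine ⟨List.mem_map.mpr ⟨(i, j), h, by unfold pvNatManh; omega⟩, fun b _ => Nat.zero_le b⟩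

-- a neighbour of a cell is at most one farther from any zero
lemma pv_dn_lipschitz (grid : List (List Int)) (i j i' j' : Nat) (k : Nat)
    (h : pvDN grid i j = some k) (hn : pvNbr (i, j) (i', j')) :
    ∃ k', pvDN grid i' j' = some k' ∧ k' ≤ k + 1 := by
  obtain ⟨z, hz, hmanh⟩ := pv_dn_attained grid i j k h
  obtain ⟨k', hk', hle⟩ := pv_dn_le grid i' j' z hz
  refine ⟨k', hk', ?_⟩
  unfold pvNatManh at hmanh hle
  unfold pvNbr at hn
  simp only at hn hmanh hle
  omega

-- a cell at positive distance has an in-range neighbour strictly closer to a zero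
lemma pv_step_down (grid : List (List Int)) (i j e : Nat)
    (hi : i < pvM grid) (hj : j < pvN grid)
    (h : pvDN grid i j = some (e + 1)) :
    ∃ i' j', i' < pvM grid ∧ j' < pvN grid ∧ pvNbr (i, j) (i', j') ∧
      ∃ k', pvDN grid i' j' = some k' ∧ k' ≤ e := by
  obtain ⟨z, hz, hmanh⟩ := pv_dn_attained grid i j (e + 1) h
  have hzr := (pv_mem_zeros grid z).mp hz
  unfold pvNatManh at hmanh
  have step : ∀ i' j', pvNatManh i' j' z = e → i' < pvM grid → j' < pvN grid →
      pvNbr (i, j) (i', j') →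
      ∃ i'' j'', i'' < pvM grid ∧ j'' < pvN grid ∧ pvNbr (i, j) (i'', j'') ∧
        ∃ k', pvDN grid i'' j'' = some k' ∧ k' ≤ e := by
    intro i' j' hm hi' hj' hn
    obtain ⟨k', hk', hle⟩ := pv_dn_le grid i' j' z hz
    exact ⟨i', j', hi', hj', hn, k', hk', by omega⟩
  by_cases h1 : i < z.1
  · exact step (i + 1) j (by unfold pvNatManh; omega) (by omega) hj (by unfold pvNbr; omega)
  · by_cases h2 : z.1 < i
    · exact step (i - 1) j (by unfold pvNatManh; omega) (by omega) hj (by unfold pvNbr; omega)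
    · by_cases h3 : j < z.2
      · exact step i (j + 1) (by unfold pvNatManh; omega) hi (by omega) (by unfold pvNbr; omega)
      · exact step i (j - 1) (by unfold pvNatManh; omega) hi (by omega) (by unfold pvNbr; omega)

-- B's entry equals the closed-form distance
lemma pv_pymin_eq (xs : List Int) : PySem.List.min? xs (fun x => x) = xs.min? := by
  cases hx : xs.min? with
  | none =>
    rw [List.min?_eq_none_iff] at hx
    subst hx
    rfl
  | some m =>
    rw [List.min?_eq_some_iff] at hx
    cases hp : PySem.List.min? xs (fun x => x) with
    | none =>
      rw [PySem.List.min?_eq_none_iff] at hp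
      subst hp
      simp at hx
    | some p =>
      have h1 : p ≤ m := PySem.List.min?_isMin hp m hx.1
      have h2 : m ≤ p := hx.2 p (PySem.List.min?_mem hp)
      rw [le_antisymm h1 h2]

lemma pv_min_map_cast (ys : List Nat) :
    (ys.map (fun k : Nat => (k : Int))).min? = ys.min?.map (fun k : Nat => (k : Int)) := by
  cases hy : ys.min? with
  | none =>
    rw [List.min?_eq_none_iff] at hy
    subst hy
    rfl
  | some m =>
    rw [List.min?_eq_some_iff] at hy
    rw [Option.map_some]
    rw [List.min?_eq_some_iff]
    constructor
    · exact List.mem_map.mpr ⟨m, hy.1, rfl⟩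
    · intro b hb
      obtain ⟨y, hy2, rfl⟩ := List.mem_map.mp hb
      exact_mod_cast hy.2 y hy2

lemma pv_manh_cast (i j : Nat) (z : Nat × Nat) :
    pvManh i j z = ((pvNatManh i j z : Nat) : Int) := by
  unfold pvManh pvNatManh
  rw [Int.abs_eq_natAbs, Int.abs_eq_natAbs]
  push_cast
  ring

lemma pv_alt_entry (grid : List (List Int)) (i j : Nat) :
    pvNearest grid i j = match pvDN grid i j with
      | some k => (k : Int)
      | none => -1 := by
  unfold pvNearest PySem.List.minD pvDN
  have hmap : (pvZeros grid).map (pvManh i j) =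
      ((pvZeros grid).map (pvNatManh i j)).map (fun k : Nat => (k : Int)) := by
    rw [List.map_map]
    exact List.map_congr_left (fun z _ => pv_manh_cast i j z)
  rw [hmap, pv_pymin_eq, pv_min_map_cast]
  cases ((pvZeros grid).map (pvNatManh i j)).min? <;> rfl

-- ---- next_moves ----
lemma pv_next_moves_eq (grid : List (List Int)) (cur : Nat × Nat) (v : List (List Bool)) :
    next_moves cur grid v =
      (([(-1, 0), (1, 0), (0, -1), (0, 1)] : List (Int × Int)).filter (fun dd =>
        decide (0 ≤ (cur.1 : Int) + dd.1 ∧ (cur.1 : Int) + dd.1 < (grid.length : Int) ∧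
          0 ≤ (cur.2 : Int) + dd.2 ∧ (cur.2 : Int) + dd.2 < ((grid.headD []).length : Int) ∧
          pvGet2B v ((cur.1 : Int) + dd.1).toNat ((cur.2 : Int) + dd.2).toNat = false))).map
        (fun dd => (((cur.1 : Int) + dd.1).toNat, ((cur.2 : Int) + dd.2).toNat)) := by
  unfold next_moves
  simp only []
  rw [PySem.List.foldl_append_ite
    (p := fun dd : Int × Int => 0 ≤ (cur.1 : Int) + dd.1 ∧ (cur.1 : Int) + dd.1 < (grid.length : Int) ∧
      0 ≤ (cur.2 : Int) + dd.2 ∧ (cur.2 : Int) + dd.2 < ((grid.headD []).length : Int) ∧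
      pvGet2B v ((cur.1 : Int) + dd.1).toNat ((cur.2 : Int) + dd.2).toNat = false)
    (f := fun dd : Int × Int => (((cur.1 : Int) + dd.1).toNat, ((cur.2 : Int) + dd.2).toNat))]
  simp

lemma pv_mem_next_moves (grid : List (List Int)) (cur : Nat × Nat)
    (v : List (List Bool)) (mv : Nat × Nat) :
    mv ∈ next_moves cur grid v ↔
      mv.1 < pvM grid ∧ mv.2 < pvN grid ∧ pvNbr cur mv ∧ pvGet2B v mv.1 mv.2 = false := by
  obtain ⟨x, y⟩ := mv
  obtain ⟨a, b⟩ := cur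
  rw [pv_next_moves_eq]
  simp only [List.mem_map, List.mem_filter, List.mem_cons, List.not_mem_nil, or_false,
    decide_eq_true_eq, pvM, pvN, pvNbr, Prod.mk.injEq]
  constructor
  · rintro ⟨dd, ⟨hd, hcond⟩, hxy⟩
    rcases hd with rfl | rfl | rfl | rfl <;>
      (simp only at hcond hxy
       obtain ⟨c1, c2, c3, c4, c5⟩ := hcond
       obtain ⟨hx, hy⟩ := hxy
       subst hx
       subst hy
       refine ⟨by omega, by omega, by omega, c5⟩)
  · rintro ⟨hx, hy, hn, hv⟩
    have hcase : ((x : Int) = (a : Int) - 1 ∧ y = b) ∨ ((x : Int) = (a : Int) + 1 ∧ y = b) ∨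
        (x = a ∧ (y : Int) = (b : Int) - 1) ∨ (x = a ∧ (y : Int) = (b : Int) + 1) := by omega
    rcases hcase with ⟨h1, h2⟩ | ⟨h1, h2⟩ | ⟨h2, h1⟩ | ⟨h2, h1⟩
    · refine ⟨(-1, 0), ⟨Or.inl rfl, ?_⟩, ?_, ?_⟩ <;> simp only
      · have e1 : ((a : Int) + -1).toNat = x := by omega
        have e2 : ((b : Int) + 0).toNat = y := by omega
        exact ⟨by omega, by omega, by omega, by omega, by rw [e1, e2]; exact hv⟩
      · omega
      · omega
    · refine ⟨(1, 0), ⟨Or.inr (Or.inl rfl), ?_⟩, ?_, ?_⟩ <;> simp only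
      · have e1 : ((a : Int) + 1).toNat = x := by omega
        have e2 : ((b : Int) + 0).toNat = y := by omega
        exact ⟨by omega, by omega, by omega, by omega, by rw [e1, e2]; exact hv⟩
      · omega
      · omega
    · refine ⟨(0, -1), ⟨Or.inr (Or.inr (Or.inl rfl)), ?_⟩, ?_, ?_⟩ <;> simp only
      · have e1 : ((a : Int) + 0).toNat = x := by omega
        have e2 : ((b : Int) + -1).toNat = y := by omega
        exact ⟨by omega, by omega, by omega, by omega, by rw [e1, e2]; exact hv⟩
      · omega
      · omega
    · refine ⟨(0, 1), ⟨Or.inr (Or.inr (Or.inr rfl)), ?_⟩, ?_, ?_⟩ <;> simp only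
      · have e1 : ((a : Int) + 0).toNat = x := by omega
        have e2 : ((b : Int) + 1).toNat = y := by omega
        exact ⟨by omega, by omega, by omega, by omega, by rw [e1, e2]; exact hv⟩
      · omega
      · omega

lemma pv_next_moves_nodup (grid : List (List Int)) (cur : Nat × Nat)
    (v : List (List Bool)) : (next_moves cur grid v).Nodup := by
  rw [pv_next_moves_eq]
  apply List.Nodup.map_on
  · intro d1 hd1 d2 hd2 heq
    have m1 := (List.mem_filter.mp hd1)
    have m2 := (List.mem_filter.mp hd2)
    have c1 := of_decide_eq_true m1.2
    have c2 := of_decide_eq_true m2.2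
    obtain ⟨e1, e2⟩ := Prod.mk.injEq .. ▸ heq
    simp only [List.mem_cons, List.not_mem_nil, or_false] at m1 m2
    obtain ⟨g1, -, g3, -, -⟩ := c1
    obtain ⟨k1, -, k3, -, -⟩ := c2
    rcases m1.1 with rfl | rfl | rfl | rfl <;> rcases m2.1 with rfl | rfl | rfl | rfl <;>
      simp only [Prod.mk.injEq] <;> simp only at g1 g3 k1 k3 e1 e2 <;> omega
  · apply List.Nodup.filter
    decide

-- ---- the fold over one popped cell's moves ----
lemma pv_rowB (grid : List (List Int)) (v : List (List Bool)) (h : pvShapeB grid v)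
    (i : Nat) (hi : i < pvM grid) : i < v.length ∧ (v.getD i []).length = pvN grid := by
  obtain ⟨h1, h2⟩ := h
  have hlt : i < v.length := by omega
  exact ⟨hlt, h2 _ (pv_getD_mem _ _ _ hlt)⟩

lemma pv_rowI (grid : List (List Int)) (d : List (List Int)) (h : pvShapeI grid d)
    (i : Nat) (hi : i < pvM grid) : i < d.length ∧ (d.getD i []).length = pvN grid := by
  obtain ⟨h1, h2⟩ := h
  have hlt : i < d.length := by omega
  exact ⟨hlt, h2 _ (pv_getD_mem _ _ _ hlt)⟩

lemma pv_fold_moves (grid : List (List Int)) (cur : Nat × Nat)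
    (hc1 : cur.1 < pvM grid) (hc2 : cur.2 < pvN grid) :
    ∀ (moves : List (Nat × Nat)) (v : List (List Bool)) (d : List (List Int))
      (rest : List (Nat × Nat)),
      pvShapeB grid v → pvShapeI grid d → moves.Nodup →
      (∀ mv ∈ moves, mv.1 < pvM grid ∧ mv.2 < pvN grid ∧ pvGet2B v mv.1 mv.2 = false) →
      pvGet2B v cur.1 cur.2 = true →
      (let res := moves.foldl
        (fun (st : List (List Bool) × List (List Int) × List (Nat × Nat)) mv =>
          (pvSet2B st.1 mv.1 mv.2 true,
           pvSet2I st.2.1 mv.1 mv.2 (pvGet2I st.2.1 cur.1 cur.2 + 1),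
           st.2.2 ++ [mv])) (v, d, rest)
       res.2.2 = rest ++ moves ∧ pvShapeB grid res.1 ∧ pvShapeI grid res.2.1 ∧
       (∀ i j, pvGet2B res.1 i j = (pvGet2B v i j || decide ((i, j) ∈ moves))) ∧
       (∀ i j, i < pvM grid → j < pvN grid →
         pvGet2I res.2.1 i j =
           if (i, j) ∈ moves then pvGet2I d cur.1 cur.2 + 1 else pvGet2I d i j) ∧
       pvFalseCount res.1 + moves.length = pvFalseCount v) := by
  intro moves
  induction moves with
  | nil =>
    intro v d rest hsv hsd hnd hmv hcur
    exact ⟨by simp, hsv, hsd, by intro i j; simp, by intro i j hi hj; simp, by simp⟩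
  | cons mv t ih =>
    intro v d rest hsv hsd hnd hmv hcur
    obtain ⟨hm1, hm2, hm3⟩ := hmv mv (List.mem_cons_self ..)
    have hvb := pv_rowB grid v hsv mv.1 hm1
    have hdb := pv_rowI grid d hsd mv.1 hm1
    have hcurne : (mv.1, mv.2) ≠ (cur.1, cur.2) := by
      intro h
      rw [Prod.mk.injEq] at h
      rw [h.1, h.2] at hm3
      rw [hm3] at hcur
      exact Bool.false_ne_true hcur
    have hv1 : pvShapeB grid (pvSet2B v mv.1 mv.2 true) := pv_shapeB_set grid v _ _ _ hsv
    have hd1 : pvShapeI grid (pvSet2I d mv.1 mv.2 (pvGet2I d cur.1 cur.2 + 1)) :=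
      pv_shapeI_set grid d _ _ _ hsd
    have hstep := ih (pvSet2B v mv.1 mv.2 true)
      (pvSet2I d mv.1 mv.2 (pvGet2I d cur.1 cur.2 + 1)) (rest ++ [mv]) hv1 hd1
      (List.Nodup.of_cons hnd)
      (by
        intro mv' hmv'
        obtain ⟨a1, a2, a3⟩ := hmv mv' (List.mem_cons_of_mem _ hmv')
        refine ⟨a1, a2, ?_⟩
        rw [pv_get2B_set2B_ne]
        · exact a3
        · intro h
          rw [Prod.mk.injEq] at h
          apply (List.nodup_cons.mp hnd).1
          have : mv = mv' := by
            obtain ⟨x1, y1⟩ := mv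
            obtain ⟨x2, y2⟩ := mv'
            simp only [Prod.mk.injEq]
            exact ⟨h.1, h.2⟩
          rwa [this])
      (by rw [pv_get2B_set2B_ne v _ _ _ _ _ hcurne]; exact hcur)
    simp only [List.foldl_cons] at hstep ⊢
    have hcurd : pvGet2I (pvSet2I d mv.1 mv.2 (pvGet2I d cur.1 cur.2 + 1)) cur.1 cur.2 =
        pvGet2I d cur.1 cur.2 := pv_get2I_set2I_ne d _ _ _ _ _ hcurne
    rw [hcurd] at hstep
    obtain ⟨r1, r2, r3, r4, r5, r6⟩ := hstep
    refine ⟨by rw [r1, List.append_assoc]; rfl, r2, r3, ?_, ?_, ?_⟩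
    · intro i j
      rw [r4 i j]
      by_cases hij : (i, j) = (mv.1, mv.2)
      · rw [Prod.mk.injEq] at hij
        rw [hij.1, hij.2]
        rw [pv_get2B_set2B_self v _ _ _ hvb.1 (by omega)]
        simp [List.mem_cons]
      · rw [pv_get2B_set2B_ne v _ _ _ _ _ (fun h => hij h.symm)]
        have hij2 : ¬ (i, j) = mv := fun h => hij (by rw [h])
        congr 1
        simp [List.mem_cons, hij2]
    · intro i j hi hj
      rw [r5 i j hi hj]
      by_cases hmem : (i, j) ∈ t
      · rw [if_pos hmem, if_pos (List.mem_cons_of_mem _ hmem)]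
      · by_cases hij : (i, j) = (mv.1, mv.2)
        · rw [Prod.mk.injEq] at hij
          rw [hij.1, hij.2]
          rw [pv_get2I_set2I_self d _ _ _ hdb.1 (by omega)]
          rw [if_pos (List.mem_cons_self ..)]
          split <;> rfl
        · rw [pv_get2I_set2I_ne d _ _ _ _ _ (fun h => hij h.symm)]
          have hnm : ¬ ((i, j) ∈ mv :: t) := by
            simp only [List.mem_cons]
            rintro (h | h)
            · exact hij (by rw [h])
            · exact hmem h
          rw [if_neg hnm, if_neg hmem]
    · have hfc := pv_falseCount_set v mv.1 mv.2 hvb.1 (by omega) hm3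
      simp only [List.length_cons]
      omega

-- ---- BFS invariant lemmas ----
-- while the queue is nonempty, every unvisited cell is strictly farther than the head
lemma pv_far (grid : List (List Int)) (q : List (Nat × Nat)) (v : List (List Bool))
    (d : List (List Int)) (h : Nat × Nat) (t : List (Nat × Nat))
    (hinv : pvInv grid q v d) (hq : q = h :: t) :
    ∀ dd i j, i < pvM grid → j < pvN grid → ¬ pvVis v i j →
      pvDN grid i j = some dd → pvDNv grid h + 1 ≤ dd := by
  subst hq
  obtain ⟨hsv, hsd, hC1, hC2, hC3, hC4, hC5, hC6, hC7⟩ := hinv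
  intro dd
  induction dd using Nat.strong_induction_on with
  | _ dd ih =>
    intro i j hi hj hnv hdn
    match dd, hdn with
    | 0, hdn =>
      exact absurd (hC7 _ ((pv_dn_zero grid i j).mp hdn)) hnv
    | (e + 1), hdn =>
      obtain ⟨i', j', hi', hj', hnbr, k', hdn', hk'⟩ := pv_step_down grid i j e hi hj hdn
      by_cases hv' : pvVis v i' j'
      · by_cases hq' : (i', j') ∈ h :: t
        · have hDNv : pvDNv grid (i', j') = k' := by simp [pvDNv, hdn']
          rcases List.mem_cons.mp hq' with heq | hmem
          · rw [← heq, hDNv]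
            omega
          · have := (List.pairwise_cons.mp hC4).1 _ hmem
            rw [hDNv] at this
            omega
        · have hnbr' : pvNbr (i', j') (i, j) := by
            unfold pvNbr at hnbr ⊢
            simp only at hnbr ⊢
            omega
          exact absurd (hC6 i' j' hi' hj' hv' hq' i j hi hj hnbr') hnv
      · have := ih k' (by omega) i' j' hi' hj' hv' hdn'
        omega

-- with an empty queue every cell at finite distance is visited
lemma pv_all_visited (grid : List (List Int)) (v : List (List Bool)) (d : List (List Int))
    (hinv : pvInv grid [] v d) :
    ∀ dd i j, i < pvM grid → j < pvN grid → pvDN grid i j = some dd → pvVis v i j := by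
  obtain ⟨hsv, hsd, hC1, hC2, hC3, hC4, hC5, hC6, hC7⟩ := hinv
  intro dd
  induction dd using Nat.strong_induction_on with
  | _ dd ih =>
    intro i j hi hj hdn
    by_contra hnv
    match dd, hdn with
    | 0, hdn =>
      exact absurd (hC7 _ ((pv_dn_zero grid i j).mp hdn)) hnv
    | (e + 1), hdn =>
      obtain ⟨i', j', hi', hj', hnbr, k', hdn', hk'⟩ := pv_step_down grid i j e hi hj hdn
      have hv' : pvVis v i' j' := ih k' (by omega) i' j' hi' hj' hdn'
      have hnbr' : pvNbr (i', j') (i, j) := by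
        unfold pvNbr at hnbr ⊢
        simp only at hnbr ⊢
        omega
      exact absurd (hC6 i' j' hi' hj' hv' (List.not_mem_nil) i j hi hj hnbr') hnv

lemma pv_done (grid : List (List Int)) (v : List (List Bool)) (d : List (List Int))
    (hinv : pvInv grid [] v d) :
    ∀ i j, i < pvM grid → j < pvN grid → pvGet2I d i j = pvNearest grid i j := by
  intro i j hi hj
  rw [pv_alt_entry]
  obtain ⟨hsv, hsd, hC1, hC2, hC3, hC4, hC5, hC6, hC7⟩ := hinv
  cases hdn : pvDN grid i j with
  | none =>
    simp only []
    by_cases hv : pvVis v i j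
    · obtain ⟨k, hk, -⟩ := hC1 i j hi hj hv
      rw [hdn] at hk
      cases hk
    · exact hC2 i j hi hj hv
  | some k =>
    simp only []
    have hv := pv_all_visited grid v d ⟨hsv, hsd, hC1, hC2, hC3, hC4, hC5, hC6, hC7⟩ k i j hi hj hdn
    obtain ⟨k2, hk2, hval⟩ := hC1 i j hi hj hv
    rw [hdn] at hk2
    cases hk2
    exact hval

-- one loop iteration preserves the invariant and decrements the measure
lemma pv_pairwise_const (l : List (Nat × Nat)) (f : Nat × Nat → Nat) (c : Nat)
    (h : ∀ x ∈ l, f x = c) : l.Pairwise (fun a b => f a ≤ f b) := by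
  induction l with
  | nil => exact List.Pairwise.nil
  | cons x t ih =>
    refine List.pairwise_cons.mpr ⟨fun b hb => ?_, ih (fun b hb => h b (List.mem_cons_of_mem _ hb))⟩
    rw [h x (List.mem_cons_self ..), h b (List.mem_cons_of_mem _ hb)]

lemma pv_step (grid : List (List Int)) (cur : Nat × Nat) (rest : List (Nat × Nat))
    (v : List (List Bool)) (d : List (List Int))
    (hinv : pvInv grid (cur :: rest) v d) :
    (let st := (next_moves cur grid v).foldl
      (fun (st : List (List Bool) × List (List Int) × List (Nat × Nat)) mv =>
        (pvSet2B st.1 mv.1 mv.2 true,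
         pvSet2I st.2.1 mv.1 mv.2 (pvGet2I st.2.1 cur.1 cur.2 + 1),
         st.2.2 ++ [mv])) (v, d, rest)
     pvInv grid st.2.2 st.1 st.2.1 ∧
     st.2.2.length + pvFalseCount st.1 + 1 = (cur :: rest).length + pvFalseCount v) := by
  have hinv' := hinv
  obtain ⟨hsv, hsd, hC1, hC2, hC3, hC4, hC5, hC6, hC7⟩ := hinv
  obtain ⟨hcu1, hcu2, hcuv⟩ := hC3 cur (List.mem_cons_self ..)
  have hmvspec : ∀ mv ∈ next_moves cur grid v,
      mv.1 < pvM grid ∧ mv.2 < pvN grid ∧ pvNbr cur mv ∧ pvGet2B v mv.1 mv.2 = false :=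
    fun mv hm => (pv_mem_next_moves grid cur v mv).mp hm
  have hnd := pv_next_moves_nodup grid cur v
  have hfold := pv_fold_moves grid cur hcu1 hcu2 (next_moves cur grid v) v d rest hsv hsd hnd
    (fun mv hm => ⟨(hmvspec mv hm).1, (hmvspec mv hm).2.1, (hmvspec mv hm).2.2.2⟩) hcuv
  obtain ⟨r1, r2, r3, r4, r5, r6⟩ := hfold
  obtain ⟨k, hk, hval⟩ := hC1 cur.1 cur.2 hcu1 hcu2 hcuv
  have hkv : pvDNv grid cur = k := by simp [pvDNv, hk]
  have hmvdn : ∀ mv ∈ next_moves cur grid v, pvDN grid mv.1 mv.2 = some (k + 1) := by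
    intro mv hm
    obtain ⟨b1, b2, hnbr, hunv⟩ := hmvspec mv hm
    obtain ⟨k', hk', hle⟩ := pv_dn_lipschitz grid cur.1 cur.2 mv.1 mv.2 k hk hnbr
    have hfar := pv_far grid (cur :: rest) v d cur rest hinv' rfl k' mv.1 mv.2 b1 b2
      (by unfold pvVis; rw [hunv]; exact Bool.false_ne_true) hk'
    rw [hkv] at hfar
    rw [hk']
    congr 1
    omega
  have hmvDNv : ∀ mv ∈ next_moves cur grid v, pvDNv grid mv = k + 1 := by
    intro mv hm
    simp [pvDNv, hmvdn mv hm]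
  have hrest_lb : ∀ b ∈ rest, k ≤ pvDNv grid b := by
    intro b hb
    have := (List.pairwise_cons.mp hC4).1 b hb
    omega
  have hq_ub : ∀ b ∈ cur :: rest, pvDNv grid b ≤ k + 1 := by
    intro b hb
    have := hC5 cur (List.mem_cons_self ..) b hb
    omega
  have hvis_mono : ∀ i j, pvVis v i j → pvVis ((next_moves cur grid v).foldl
      (fun (st : List (List Bool) × List (List Int) × List (Nat × Nat)) mv =>
        (pvSet2B st.1 mv.1 mv.2 true,
         pvSet2I st.2.1 mv.1 mv.2 (pvGet2I st.2.1 cur.1 cur.2 + 1),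
         st.2.2 ++ [mv])) (v, d, rest)).1 i j := by
    intro i j hv
    unfold pvVis at hv ⊢
    rw [r4 i j, hv, Bool.true_or]
  have hvis_mv : ∀ mv ∈ next_moves cur grid v, pvVis ((next_moves cur grid v).foldl
      (fun (st : List (List Bool) × List (List Int) × List (Nat × Nat)) mv =>
        (pvSet2B st.1 mv.1 mv.2 true,
         pvSet2I st.2.1 mv.1 mv.2 (pvGet2I st.2.1 cur.1 cur.2 + 1),
         st.2.2 ++ [mv])) (v, d, rest)).1 mv.1 mv.2 := by
    intro mv hm
    unfold pvVis
    rw [r4 mv.1 mv.2]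
    have : ((mv.1, mv.2) ∈ next_moves cur grid v) := by
      have : (mv.1, mv.2) = mv := rfl
      rwa [this]
    rw [decide_eq_true this, Bool.or_true]
  have hvis_back : ∀ i j, pvVis ((next_moves cur grid v).foldl
      (fun (st : List (List Bool) × List (List Int) × List (Nat × Nat)) mv =>
        (pvSet2B st.1 mv.1 mv.2 true,
         pvSet2I st.2.1 mv.1 mv.2 (pvGet2I st.2.1 cur.1 cur.2 + 1),
         st.2.2 ++ [mv])) (v, d, rest)).1 i j →
      pvVis v i j ∨ (i, j) ∈ next_moves cur grid v := by
    intro i j hv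
    unfold pvVis at hv ⊢
    rw [r4 i j] at hv
    rcases Bool.or_eq_true_iff.mp hv with h | h
    · exact Or.inl h
    · exact Or.inr (of_decide_eq_true h)
  refine ⟨⟨r2, r3, ?_, ?_, ?_, ?_, ?_, ?_, ?_⟩, ?_⟩
  · -- C1
    intro i j hi hj hvis
    rcases hvis_back i j hvis with hv | hm
    · have hnm : (i, j) ∉ next_moves cur grid v := by
        intro hmem
        have := ((pv_mem_next_moves grid cur v (i, j)).mp hmem).2.2.2
        unfold pvVis at hv
        rw [this] at hv
        exact Bool.false_ne_true hv
      obtain ⟨k2, hk2, hval2⟩ := hC1 i j hi hj hv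
      refine ⟨k2, hk2, ?_⟩
      rw [r5 i j hi hj, if_neg hnm]
      exact hval2
    · refine ⟨k + 1, hmvdn (i, j) hm, ?_⟩
      rw [r5 i j hi hj, if_pos hm, hval]
      push_cast
      ring
  · -- C2
    intro i j hi hj hvis
    have hnv : ¬ pvVis v i j := fun h => hvis (hvis_mono i j h)
    have hnm : (i, j) ∉ next_moves cur grid v := by
      intro hmem
      apply hvis
      have := hvis_mv (i, j) hmem
      exact this
    rw [r5 i j hi hj, if_neg hnm]
    exact hC2 i j hi hj hnv
  · -- C3
    intro p hp
    rw [r1] at hp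
    rcases List.mem_append.mp hp with hm | hm
    · obtain ⟨b1, b2, b3⟩ := hC3 p (List.mem_cons_of_mem _ hm)
      exact ⟨b1, b2, hvis_mono p.1 p.2 b3⟩
    · obtain ⟨b1, b2, -, -⟩ := hmvspec p hm
      exact ⟨b1, b2, hvis_mv p hm⟩
  · -- C4
    rw [r1]
    rw [List.pairwise_append]
    refine ⟨(List.pairwise_cons.mp hC4).2, pv_pairwise_const _ _ (k + 1) hmvDNv, ?_⟩
    intro a ha b hb
    rw [hmvDNv b hb]
    have := hq_ub a (List.mem_cons_of_mem _ ha)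
    omega
  · -- C5
    intro a ha b hb
    rw [r1] at ha hb
    rcases List.mem_append.mp ha with ha' | ha' <;> rcases List.mem_append.mp hb with hb' | hb'
    · have h1 := hq_ub b (List.mem_cons_of_mem _ hb')
      have h2 := hrest_lb a ha'
      omega
    · rw [hmvDNv b hb']
      have h2 := hrest_lb a ha'
      omega
    · have h1 := hq_ub b (List.mem_cons_of_mem _ hb')
      rw [hmvDNv a ha']
      omega
    · rw [hmvDNv b hb', hmvDNv a ha']
      omega
  · -- C6
    intro i j hi hj hvis hnq i' j' hi' hj' hnbr
    rw [r1] at hnq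
    have hnr : (i, j) ∉ rest := fun h => hnq (List.mem_append.mpr (Or.inl h))
    have hnm : (i, j) ∉ next_moves cur grid v := fun h => hnq (List.mem_append.mpr (Or.inr h))
    by_cases hc : (i, j) = (cur.1, cur.2)
    · by_cases hv' : pvVis v i' j'
      · exact hvis_mono i' j' hv'
      · have hm' : (i', j') ∈ next_moves cur grid v := by
          apply (pv_mem_next_moves grid cur v (i', j')).mpr
          refine ⟨hi', hj', ?_, ?_⟩
          · have : pvNbr (cur.1, cur.2) (i', j') := hc ▸ hnbr
            exact this
          · unfold pvVis at hv'
            cases hgb : pvGet2B v i' j'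
            · rfl
            · exact absurd hgb hv' 
        exact hvis_mv (i', j') hm'
    · have hv : pvVis v i j := by
        rcases hvis_back i j hvis with h | h
        · exact h
        · exact absurd h hnm
      have hncur : (i, j) ∉ cur :: rest := by
        intro h
        rcases List.mem_cons.mp h with h' | h'
        · exact hc (by rw [h'])
        · exact hnr h'
      exact hvis_mono i' j' (hC6 i j hi hj hv hncur i' j' hi' hj' hnbr)
  · -- C7
    intro p hp
    exact hvis_mono p.1 p.2 (hC7 p hp)
  · -- measure
    have hlen : ((next_moves cur grid v).foldl
      (fun (st : List (List Bool) × List (List Int) × List (Nat × Nat)) mv =>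
        (pvSet2B st.1 mv.1 mv.2 true,
         pvSet2I st.2.1 mv.1 mv.2 (pvGet2I st.2.1 cur.1 cur.2 + 1),
         st.2.2 ++ [mv])) (v, d, rest)).2.2.length = rest.length + (next_moves cur grid v).length := by
      rw [r1, List.length_append]
    rw [hlen]
    simp only [List.length_cons]
    omega

-- the main induction over the fuel
lemma pv_bfs_main (grid : List (List Int)) :
    ∀ (fuel : Nat) (q : List (Nat × Nat)) (v : List (List Bool)) (d : List (List Int)),
      pvInv grid q v d → q.length + pvFalseCount v < fuel →
      pvShapeI grid (pvBfs grid fuel q v d) ∧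
      ∀ i j, i < pvM grid → j < pvN grid →
        pvGet2I (pvBfs grid fuel q v d) i j = pvNearest grid i j := by
  intro fuel
  induction fuel with
  | zero =>
    intro q v d hinv hm
    omega
  | succ fuel ih =>
    intro q v d hinv hm
    cases q with
    | nil =>
      rw [show pvBfs grid (fuel + 1) [] v d = d from rfl]
      exact ⟨hinv.2.1, pv_done grid v d hinv⟩
    | cons cur rest =>
      have hstep := pv_step grid cur rest v d hinv
      simp only [] at hstep
      rw [show pvBfs grid (fuel + 1) (cur :: rest) v d =
        pvBfs grid fuel ((next_moves cur grid v).foldl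
          (fun (st : List (List Bool) × List (List Int) × List (Nat × Nat)) mv =>
            (pvSet2B st.1 mv.1 mv.2 true,
             pvSet2I st.2.1 mv.1 mv.2 (pvGet2I st.2.1 cur.1 cur.2 + 1),
             st.2.2 ++ [mv])) (v, d, rest)).2.2
          ((next_moves cur grid v).foldl
          (fun (st : List (List Bool) × List (List Int) × List (Nat × Nat)) mv =>
            (pvSet2B st.1 mv.1 mv.2 true,
             pvSet2I st.2.1 mv.1 mv.2 (pvGet2I st.2.1 cur.1 cur.2 + 1),
             st.2.2 ++ [mv])) (v, d, rest)).1
          ((next_moves cur grid v).foldl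
          (fun (st : List (List Bool) × List (List Int) × List (Nat × Nat)) mv =>
            (pvSet2B st.1 mv.1 mv.2 true,
             pvSet2I st.2.1 mv.1 mv.2 (pvGet2I st.2.1 cur.1 cur.2 + 1),
             st.2.2 ++ [mv])) (v, d, rest)).2.1 from rfl]
      refine ih _ _ _ hstep.1 ?_
      have := hstep.2
      simp only [List.length_cons] at this hm
      omega

-- ---- the seeding loops ----
def pvAllCells (grid : List (List Int)) : List (Nat × Nat) :=
  (List.range (pvM grid)).flatMap (fun r => (List.range (pvN grid)).map (fun c => (r, c)))

lemma pv_mem_allCells (grid : List (List Int)) (p : Nat × Nat) :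
    p ∈ pvAllCells grid ↔ p.1 < pvM grid ∧ p.2 < pvN grid := by
  obtain ⟨a, b⟩ := p
  simp [pvAllCells, List.mem_flatMap, List.mem_map, List.mem_range]

lemma pv_zeros_filter (grid : List (List Int)) :
    (pvAllCells grid).filter (fun p => decide (pvGet2I grid p.1 p.2 = 0)) = pvZeros grid := by
  unfold pvAllCells pvZeros
  rw [List.filter_flatMap]
  congr 1
  funext r
  rw [List.filter_map]
  rfl

lemma pv_seed_fold (grid : List (List Int)) :
    ∀ (cells : List (Nat × Nat)) (q : List (Nat × Nat)) (v : List (List Bool))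
      (d : List (List Int)),
      pvShapeB grid v → pvShapeI grid d → (∀ p ∈ cells, p.1 < pvM grid ∧ p.2 < pvN grid) →
      (let res := cells.foldl
        (fun (st : List (Nat × Nat) × List (List Bool) × List (List Int)) p =>
          if pvGet2I grid p.1 p.2 = 0 then
            (st.1 ++ [(p.1, p.2)], pvSet2B st.2.1 p.1 p.2 true, pvSet2I st.2.2 p.1 p.2 0)
          else st) (q, v, d)
       res.1 = q ++ cells.filter (fun p => decide (pvGet2I grid p.1 p.2 = 0)) ∧
       pvShapeB grid res.2.1 ∧ pvShapeI grid res.2.2 ∧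
       (∀ i j, pvGet2B res.2.1 i j =
         (pvGet2B v i j || decide ((i, j) ∈ cells ∧ pvGet2I grid i j = 0))) ∧
       (∀ i j, i < pvM grid → j < pvN grid →
         pvGet2I res.2.2 i j =
           if (i, j) ∈ cells ∧ pvGet2I grid i j = 0 then 0 else pvGet2I d i j)) := by
  intro cells
  induction cells with
  | nil =>
    intro q v d hsv hsd hc
    exact ⟨by simp, hsv, hsd, by intro i j; simp, by intro i j hi hj; simp⟩
  | cons p t ih =>
    intro q v d hsv hsd hc
    obtain ⟨hp1, hp2⟩ := hc p (List.mem_cons_self ..)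
    have hvb := pv_rowB grid v hsv p.1 hp1
    have hdb := pv_rowI grid d hsd p.1 hp1
    simp only [List.foldl_cons]
    by_cases hz : pvGet2I grid p.1 p.2 = 0
    · rw [if_pos hz]
      have hstep := ih (q ++ [(p.1, p.2)]) (pvSet2B v p.1 p.2 true) (pvSet2I d p.1 p.2 0)
        (pv_shapeB_set grid v _ _ _ hsv) (pv_shapeI_set grid d _ _ _ hsd)
        (fun p' hp' => hc p' (List.mem_cons_of_mem _ hp'))
      obtain ⟨r1, r2, r3, r4, r5⟩ := hstep
      refine ⟨?_, r2, r3, ?_, ?_⟩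
      · rw [r1, List.filter_cons, if_pos (by simpa using hz), List.append_assoc]
        rfl
      · intro i j
        rw [r4 i j]
        by_cases hij : (i, j) = (p.1, p.2)
        · rw [Prod.mk.injEq] at hij
          rw [hij.1, hij.2]
          rw [pv_get2B_set2B_self v _ _ _ hvb.1 (by omega)]
          simp only [Bool.true_or]
          have hmem : ((p.1 : Nat), (p.2 : Nat)) ∈ p :: t := List.mem_cons_self ..
          rw [decide_eq_true ⟨hmem, hz⟩, Bool.or_true]
        · rw [pv_get2B_set2B_ne v _ _ _ _ _ (fun h => hij h.symm)]
          congr 1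
          have hij2 : ¬ (i, j) = p := fun h => hij (by rw [h])
          simp only [List.mem_cons, decide_eq_decide]
          constructor
          · rintro ⟨hm, hz'⟩
            exact ⟨Or.inr hm, hz'⟩
          · rintro ⟨hm | hm, hz'⟩
            · exact absurd hm hij2
            · exact ⟨hm, hz'⟩
      · intro i j hi hj
        rw [r5 i j hi hj]
        by_cases hmem : (i, j) ∈ t ∧ pvGet2I grid i j = 0
        · rw [if_pos hmem, if_pos ⟨List.mem_cons_of_mem _ hmem.1, hmem.2⟩]
        · rw [if_neg hmem]
          by_cases hij : (i, j) = (p.1, p.2)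
          · rw [Prod.mk.injEq] at hij
            rw [hij.1, hij.2]
            rw [pv_get2I_set2I_self d _ _ _ hdb.1 (by omega)]
            rw [if_pos ⟨List.mem_cons_self .., hz⟩]
          · rw [pv_get2I_set2I_ne d _ _ _ _ _ (fun h => hij h.symm)]
            have hnm : ¬ ((i, j) ∈ p :: t ∧ pvGet2I grid i j = 0) := by
              rintro ⟨hm, hz'⟩
              rcases List.mem_cons.mp hm with h | h
              · exact hij (by rw [h])
              · exact hmem ⟨h, hz'⟩
            rw [if_neg hnm]
    · rw [if_neg hz]
      have hstep := ih q v d hsv hsd (fun p' hp' => hc p' (List.mem_cons_of_mem _ hp'))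
      obtain ⟨r1, r2, r3, r4, r5⟩ := hstep
      refine ⟨?_, r2, r3, ?_, ?_⟩
      · rw [r1, List.filter_cons, if_neg (by simpa using hz)]
      · intro i j
        rw [r4 i j]
        congr 1
        simp only [List.mem_cons, decide_eq_decide]
        constructor
        · rintro ⟨hm, hz'⟩
          exact ⟨Or.inr hm, hz'⟩
        · rintro ⟨hm | hm, hz'⟩
          · subst hm
            exact absurd hz' (by simpa using hz)
          · exact ⟨hm, hz'⟩
      · intro i j hi hj
        rw [r5 i j hi hj]
        by_cases hmem : (i, j) ∈ t ∧ pvGet2I grid i j = 0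
        · rw [if_pos hmem, if_pos ⟨List.mem_cons_of_mem _ hmem.1, hmem.2⟩]
        · rw [if_neg hmem]
          have hnm : ¬ ((i, j) ∈ p :: t ∧ pvGet2I grid i j = 0) := by
            rintro ⟨hm, hz'⟩
            rcases List.mem_cons.mp hm with h | h
            · exact hz (by rw [← h]; exact hz')
            · exact hmem ⟨h, hz'⟩
          rw [if_neg hnm]

lemma pv_init_shapeB (grid : List (List Int)) :
    pvShapeB grid ((List.range (pvM grid)).map
      (fun _ => (List.range (pvN grid)).map (fun _ => false))) := by
  constructor
  · simp [pvM]
  · intro r hr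
    simp only [List.mem_map] at hr
    obtain ⟨x, -, rfl⟩ := hr
    simp [pvN]

lemma pv_init_shapeI (grid : List (List Int)) :
    pvShapeI grid ((List.range (pvM grid)).map
      (fun _ => (List.range (pvN grid)).map (fun _ => (-1 : Int)))) := by
  constructor
  · simp [pvM]
  · intro r hr
    simp only [List.mem_map] at hr
    obtain ⟨x, -, rfl⟩ := hr
    simp [pvN]

lemma pv_init_getB (grid : List (List Int)) (i j : Nat) :
    pvGet2B ((List.range (pvM grid)).map
      (fun _ => (List.range (pvN grid)).map (fun _ => false))) i j = false := by
  unfold pvGet2B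
  by_cases hi : i < pvM grid
  · rw [PySem.List.getD_map_range _ _ _ _ hi]
    by_cases hj : j < pvN grid
    · rw [PySem.List.getD_map_range _ _ _ _ hj]
    · have hrow : ((List.range (pvN grid)).map (fun _ => false)).getD j false = false := by
        rw [List.getD_eq_getElem?_getD, List.getElem?_eq_none (by simpa using hj)]
        rfl
      exact hrow
  · have houter : ((List.range (pvM grid)).map
        (fun _ => (List.range (pvN grid)).map (fun _ => false))).getD i [] = [] := by
      rw [List.getD_eq_getElem?_getD, List.getElem?_eq_none (by simpa using hi)]
      rfl
    rw [houter]
    rfl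

lemma pv_init_getI (grid : List (List Int)) (i j : Nat) (hi : i < pvM grid)
    (hj : j < pvN grid) :
    pvGet2I ((List.range (pvM grid)).map
      (fun _ => (List.range (pvN grid)).map (fun _ => (-1 : Int)))) i j = -1 := by
  unfold pvGet2I
  rw [PySem.List.getD_map_range _ _ _ _ hi, PySem.List.getD_map_range _ _ _ _ hj]

-- the seed state satisfies the invariant
lemma pv_seed_spec (grid : List (List Int)) :
    (pvSeed grid (pvM grid) (pvN grid)).1 = pvZeros grid ∧
    pvInv grid (pvSeed grid (pvM grid) (pvN grid)).1
      (pvSeed grid (pvM grid) (pvN grid)).2.1 (pvSeed grid (pvM grid) (pvN grid)).2.2 := by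
  have hfold : pvSeed grid (pvM grid) (pvN grid) = (pvAllCells grid).foldl
      (fun (st : List (Nat × Nat) × List (List Bool) × List (List Int)) p =>
        if pvGet2I grid p.1 p.2 = 0 then
          (st.1 ++ [(p.1, p.2)], pvSet2B st.2.1 p.1 p.2 true, pvSet2I st.2.2 p.1 p.2 0)
        else st)
      ([], (List.range (pvM grid)).map (fun _ => (List.range (pvN grid)).map (fun _ => false)),
        (List.range (pvM grid)).map (fun _ => (List.range (pvN grid)).map (fun _ => (-1 : Int)))) := by
    unfold pvSeed pvAllCells
    rw [List.foldl_flatMap]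
    congr 1
    funext st r
    rw [List.foldl_map]
  have hspec := pv_seed_fold grid (pvAllCells grid) []
    ((List.range (pvM grid)).map (fun _ => (List.range (pvN grid)).map (fun _ => false)))
    ((List.range (pvM grid)).map (fun _ => (List.range (pvN grid)).map (fun _ => (-1 : Int))))
    (pv_init_shapeB grid) (pv_init_shapeI grid)
    (fun p hp => (pv_mem_allCells grid p).mp hp)
  simp only [] at hspec
  obtain ⟨r1, r2, r3, r4, r5⟩ := hspec
  rw [pv_zeros_filter, List.nil_append] at r1
  rw [hfold]
  -- characterize visitedness of the seeded state
  have hvis : ∀ i j, i < pvM grid → j < pvN grid →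
      (pvVis ((pvAllCells grid).foldl
        (fun (st : List (Nat × Nat) × List (List Bool) × List (List Int)) p =>
          if pvGet2I grid p.1 p.2 = 0 then
            (st.1 ++ [(p.1, p.2)], pvSet2B st.2.1 p.1 p.2 true, pvSet2I st.2.2 p.1 p.2 0)
          else st)
        ([], (List.range (pvM grid)).map (fun _ => (List.range (pvN grid)).map (fun _ => false)),
          (List.range (pvM grid)).map (fun _ => (List.range (pvN grid)).map (fun _ => (-1 : Int))))).2.1 i j
       ↔ (i, j) ∈ pvZeros grid) := by
    intro i j hi hj
    unfold pvVis
    rw [r4 i j, pv_init_getB, Bool.false_or]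
    rw [pv_mem_zeros]
    simp only [decide_eq_true_eq, pv_mem_allCells]
    constructor
    · rintro ⟨-, hz⟩
      exact ⟨hi, hj, hz⟩
    · rintro ⟨-, -, hz⟩
      exact ⟨⟨hi, hj⟩, hz⟩
  refine ⟨r1, r2, r3, ?_, ?_, ?_, ?_, ?_, ?_, ?_⟩
  · -- C1
    intro i j hi hj hv
    have hz := (hvis i j hi hj).mp hv
    refine ⟨0, (pv_dn_zero grid i j).mpr hz, ?_⟩
    rw [r5 i j hi hj, if_pos ⟨(pv_mem_allCells grid (i, j)).mpr ⟨hi, hj⟩,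
      ((pv_mem_zeros grid (i, j)).mp hz).2.2⟩]
    rfl
  · -- C2
    intro i j hi hj hv
    have hz : ¬ ((i, j) ∈ pvAllCells grid ∧ pvGet2I grid i j = 0) := by
      rintro ⟨-, hz'⟩
      exact hv ((hvis i j hi hj).mpr ((pv_mem_zeros grid (i, j)).mpr ⟨hi, hj, hz'⟩))
    rw [r5 i j hi hj, if_neg hz]
    exact pv_init_getI grid i j hi hj
  · -- C3
    intro p hp
    rw [r1] at hp
    have hz := (pv_mem_zeros grid p).mp hp
    exact ⟨hz.1, hz.2.1, (hvis p.1 p.2 hz.1 hz.2.1).mpr hp⟩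
  · -- C4
    rw [r1]
    apply pv_pairwise_const _ _ 0
    intro p hp
    have hz := (pv_dn_zero grid p.1 p.2).mpr hp
    simp [pvDNv, hz]
  · -- C5
    intro a ha b hb
    rw [r1] at ha hb
    have hza := (pv_dn_zero grid a.1 a.2).mpr ha
    have hzb := (pv_dn_zero grid b.1 b.2).mpr hb
    simp [pvDNv, hza, hzb]
  · -- C6
    intro i j hi hj hv hnq i' j' hi' hj' hnbr
    exfalso
    apply hnq
    rw [r1]
    exact (hvis i j hi hj).mp hv
  · -- C7
    intro p hp
    have hz := (pv_mem_zeros grid p).mp hp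
    exact (hvis p.1 p.2 hz.1 hz.2.1).mpr hp

-- ===== VERDICT (by name: the statement is the Claim_ definition above) =====
lemma pv_get2I_getElem (d : List (List Int)) (i j : Nat) (h1 : i < d.length)
    (h2 : j < d[i].length) : pvGet2I d i j = d[i][j] := by
  unfold pvGet2I
  have hrow : d.getD i [] = d[i] := by
    rw [List.getD_eq_getElem?_getD, List.getElem?_eq_getElem h1, Option.getD_some]
  rw [hrow, List.getD_eq_getElem?_getD, List.getElem?_eq_getElem h2, Option.getD_some]

theorem nearest_zombie_spec : Claim_equal_nearest_zombie := by
  intro grid hdom hpre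
  unfold Spec_nearest_zombie
  obtain ⟨hq0, hinv⟩ := pv_seed_spec grid
  have hfc := pv_falseCount_le grid _ hinv.1
  have hmain := pv_bfs_main grid
    ((pvSeed grid (pvM grid) (pvN grid)).1.length + pvM grid * pvN grid + 1)
    (pvSeed grid (pvM grid) (pvN grid)).1 (pvSeed grid (pvM grid) (pvN grid)).2.1
    (pvSeed grid (pvM grid) (pvN grid)).2.2 hinv (by omega)
  obtain ⟨hshape, hval⟩ := hmain
  show pvBfs grid ((pvSeed grid (pvM grid) (pvN grid)).1.length + pvM grid * pvN grid + 1)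
      (pvSeed grid (pvM grid) (pvN grid)).1 (pvSeed grid (pvM grid) (pvN grid)).2.1
      (pvSeed grid (pvM grid) (pvN grid)).2.2 = nearest_zombie_alt grid
  apply List.ext_getElem
  · rw [hshape.1]
    simp [nearest_zombie_alt, pvM]
  · intro i h1 h2
    have hi : i < pvM grid := by rw [hshape.1] at h1; exact h1
    have hrowlen : (pvBfs grid
        ((pvSeed grid (pvM grid) (pvN grid)).1.length + pvM grid * pvN grid + 1)
        (pvSeed grid (pvM grid) (pvN grid)).1 (pvSeed grid (pvM grid) (pvN grid)).2.1
        (pvSeed grid (pvM grid) (pvN grid)).2.2)[i].length = pvN grid :=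
      hshape.2 _ (List.getElem_mem h1)
    apply List.ext_getElem
    · rw [hrowlen]
      simp [nearest_zombie_alt, pvN]
    · intro j hj1 hj2
      have hj : j < pvN grid := by rw [hrowlen] at hj1; exact hj1
      rw [← pv_get2I_getElem _ _ _ h1 hj1, hval i j hi hj]
      simp [nearest_zombie_alt]
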